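-- pv_equiv track=rewrite | github.com/kowi-kowi/RPA_projects | EDI/SE_EDI.py | getVisma
-- ===== SOURCE A (Python) =====
-- def getVisma(text):
--     keyword = 'Sender id:'
--     customerName = ''
--
--     table = text.split('\n')
--     lista = list()
--
--     for element in table:
--         if keyword in element:
--             lista.append(element)
--
--     if lista:
--         customerName = lista[0][len(keyword):].strip()
--
--
--     if customerName:
--         return customerName+' '
--     else:
--         return '****************'
-- ===== SOURCE B (Python) =====
-- def getVisma(text):
--     keyword = 'Sender id:'
--     idx = text.find(keyword)
--     if idx == -1:
--         return '****************'
--     start = text.rfind('\n', 0, idx) + 1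
--     end = text.find('\n', idx)
--     if end == -1:
--         end = len(text)
--     name = text[start:end][len(keyword):].strip()
--     return name + ' ' if name else '****************'
-- ===== Notes on version B (the rewrite author's own statement) =====
-- stated objective: alternative
-- what changed: Instead of splitting the whole text into a list of lines and filtering them, B locates the first occurrence of the keyword with str.find and reconstructs only the enclosing line via rfind/find on newline indices.
import Mathlib
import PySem

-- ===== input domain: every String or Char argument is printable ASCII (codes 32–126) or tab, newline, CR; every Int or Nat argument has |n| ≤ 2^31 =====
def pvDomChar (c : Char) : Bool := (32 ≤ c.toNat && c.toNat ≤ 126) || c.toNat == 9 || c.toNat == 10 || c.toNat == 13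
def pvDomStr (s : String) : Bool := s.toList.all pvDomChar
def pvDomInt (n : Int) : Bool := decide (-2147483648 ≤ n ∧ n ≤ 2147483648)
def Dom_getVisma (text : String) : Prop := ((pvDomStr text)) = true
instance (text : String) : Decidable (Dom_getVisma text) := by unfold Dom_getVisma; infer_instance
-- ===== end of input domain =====

-- B replaces A's split-into-lines-then-filter tokenization by a direct index search
-- (find the keyword once, reconstruct only its enclosing line with rfind/find on '\n');
-- objective: alternative algorithm, same O(n) cost.

-- ===== PORT A =====
-- A, line by line, on the code points (PySem.Str.* are thin wrappers over PySem.Chars.* on toList):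
-- split('\n'); collect the lines containing the keyword; take the first; slice off len(keyword); strip.
def getVismaCore (s : List Char) : List Char :=
  let keyword : List Char := "Sender id:".toList
  let table := PySem.Chars.splitOn s ['\n']
  let lista := table.foldl
    (fun acc element => if PySem.Chars.isIn keyword element then acc ++ [element] else acc)
    ([] : List (List Char))
  let customerName : List Char :=
    match lista with
    | [] => []
    | l0 :: _ => PySem.Chars.strip (PySem.List.slice l0 (some (keyword.length : Int)) none)
  if customerName ≠ [] then customerName ++ [' '] else "****************".toList

def getVisma (text : String) : String := String.ofList (getVismaCore text.toList)

-- ===== PORT B =====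
-- B, line by line: idx = find(keyword); if -1, sentinel; else line start = rfind('\n',0,idx)+1,
-- line end = find('\n',idx) (length if -1); slice the line, drop len(keyword), strip.
def getVismaAltCore (s : List Char) : List Char :=
  let keyword : List Char := "Sender id:".toList
  let idx := PySem.Chars.find s keyword
  if idx = -1 then "****************".toList
  else
    let start := PySem.Chars.rfindFrom s ['\n'] 0 (some idx) + 1
    let stop := PySem.Chars.findFrom s ['\n'] idx none
    let stop := if stop = -1 then (s.length : Int) else stop
    let name := PySem.Chars.strip
      (PySem.List.slice (PySem.List.slice s (some start) (some stop))
        (some (keyword.length : Int)) none)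
    if name ≠ [] then name ++ [' '] else "****************".toList

def getVisma_alt (text : String) : String := String.ofList (getVismaAltCore text.toList)

-- ===== PRECONDITION & SPEC =====
def Spec_getVisma (text : String) (out : String) : Prop := out = getVisma_alt text
instance (text : String) (out : String) : Decidable (Spec_getVisma text out) := by unfold Spec_getVisma; infer_instance

-- ===== CLAIM (what is proved, stated in full; the proofs are below) =====
def Claim_equal_getVisma : Prop := ∀ (text : String), Dom_getVisma text → Spec_getVisma text (getVisma text)

-- ===== LEMMAS AND PROOFS =====

-- helper function defs
def ffind (sub : List Char) : List Char → Option Nat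
  | [] => none
  | a :: t => if sub.isPrefixOf (a :: t) then some 0 else (ffind sub t).map (· + 1)

def rlastc (c : Char) : List Char → Option Nat
  | [] => none
  | a :: t =>
    match rlastc c t with
    | some i => some (i + 1)
    | none => if a = c then some 0 else none

def splitAux (cur : List Char) : List Char → List (List Char)
  | [] => [cur]
  | a :: t => if a = '\n' then cur :: splitAux [] t else splitAux (cur ++ [a]) t

theorem find_go_eq (sub : List Char) (hne : sub ≠ []) :
    ∀ (s : List Char) (k : Nat), PySem.Chars.find.go sub s k =
      (match ffind sub s with | none => -1 | some i => ((k + i : Nat) : Int)) := by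
  intro s
  induction s with
  | nil => intro k; simp [PySem.Chars.find.go, ffind, List.isEmpty_iff, hne]
  | cons a t ih =>
    intro k
    rw [PySem.Chars.find.go]
    by_cases hp : sub.isPrefixOf (a :: t)
    · simp [hp, ffind]
    · simp only [hp, if_false, ffind, ih]
      cases h : ffind sub t <;> simp [h] <;> push_cast <;> ring_nf

theorem find_eq (sub s : List Char) (hne : sub ≠ []) :
    PySem.Chars.find s sub =
      (match ffind sub s with | none => -1 | some i => ((i : Nat) : Int)) := by
  rw [PySem.Chars.find, find_go_eq sub hne]
  cases h : ffind sub s <;> simp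

theorem ffind_some_prefix {sub s : List Char} {i : Nat} :
    ffind sub s = some i → sub <+: s.drop i := by
  induction s generalizing i with
  | nil => simp [ffind]
  | cons a t ih =>
    intro h
    rw [ffind] at h
    by_cases hp : sub.isPrefixOf (a :: t)
    · simp [hp] at h
      subst h
      simpa [List.isPrefixOf_iff_prefix] using hp
    · simp [hp] at h
      obtain ⟨j, hj, rfl⟩ := h
      simpa using ih hj

theorem prefix_append_cons_iff {sub u r : List Char} {c : Char} (hc : c ∉ sub) :
    sub <+: (u ++ c :: r) ↔ sub <+: u := by
  constructor
  · intro h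
    by_cases hle : sub.length ≤ u.length
    · exact List.prefix_of_prefix_length_le h (List.prefix_append u (c :: r)) hle
    · have hlt : u.length < sub.length := by omega
      exfalso
      obtain ⟨t, ht⟩ := h
      have hget : (sub ++ t)[u.length]'(by simp; omega) = (u ++ c :: r)[u.length]'(by simp) :=
        List.getElem_of_eq ht _
      rw [List.getElem_append_left hlt, List.getElem_append_right (Nat.le_refl _)] at hget
      simp at hget
      exact hc (hget ▸ List.getElem_mem _)
  · intro h
    exact h.trans (List.prefix_append u (c :: r))

theorem ffind_split {sub : List Char} (hne : sub ≠ []) (hnl : '\n' ∉ sub) (l r : List Char) :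
    ffind sub (l ++ '\n' :: r) =
      (match ffind sub l with
       | some i => some i
       | none => (ffind sub r).map (l.length + 1 + ·)) := by
  induction l with
  | nil =>
    simp only [List.nil_append]
    have hp : sub.isPrefixOf ('\n' :: r) = false := by
      rw [Bool.eq_false_iff]
      intro h
      rcases sub with _ | ⟨a, t⟩
      · exact hne rfl
      · have := List.isPrefixOf_iff_prefix.mp h
        obtain ⟨w, hw⟩ := this
        simp at hw
        exact hnl (by simp [hw.1])
    rw [show ffind sub ('\n' :: r) =
      if sub.isPrefixOf ('\n' :: r) then some 0 else (ffind sub r).map (· + 1) from rfl]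
    rw [if_neg (by simp [hp])]
    cases h : ffind sub r <;> simp [ffind, h] <;> try omega
  | cons a t ih =>
    rw [List.cons_append, ffind, ffind]
    have hiff : sub.isPrefixOf (a :: (t ++ '\n' :: r)) = sub.isPrefixOf (a :: t) := by
      rw [Bool.eq_iff_iff, List.isPrefixOf_iff_prefix, List.isPrefixOf_iff_prefix,
        ← List.cons_append]
      exact prefix_append_cons_iff hnl
    rw [hiff]
    by_cases hp : sub.isPrefixOf (a :: t)
    · simp [hp]
    · rw [if_neg hp, if_neg hp, ih]
      cases h1 : ffind sub t <;> cases h2 : ffind sub r <;> simp [h1, h2] <;> omega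

theorem singleton_isPrefixOf (c a : Char) (t : List Char) :
    [c].isPrefixOf (a :: t) = (c == a) := by
  simp [List.isPrefixOf]

theorem ffind_singleton_none_iff {c : Char} {s : List Char} :
    ffind [c] s = none ↔ c ∉ s := by
  induction s with
  | nil => simp [ffind]
  | cons a t ih =>
    rw [ffind, singleton_isPrefixOf]
    by_cases h : c = a
    · simp [h]
    · rw [if_neg (by simpa using h)]
      simp only [Option.map_eq_none_iff, ih, List.mem_cons]
      constructor
      · intro hh hor
        exact hor.elim (fun he => h he) hh
      · intro hh ht
        exact hh (Or.inr ht)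

theorem ffind_singleton_append {c : Char} {u r : List Char} (hcu : c ∉ u) :
    ffind [c] (u ++ c :: r) = some u.length := by
  induction u with
  | nil =>
    simp only [List.nil_append]
    rw [ffind, singleton_isPrefixOf]
    simp
  | cons a t ih =>
    rw [List.cons_append, ffind, singleton_isPrefixOf]
    have ha : ¬ c = a := fun hh => hcu (by simp [hh])
    rw [if_neg (by simpa using ha), ih (fun hh => hcu (by simp [hh]))]
    simp

theorem rlastc_none_iff {c : Char} {u : List Char} : rlastc c u = none ↔ c ∉ u := by
  induction u with
  | nil => simp [rlastc]
  | cons a t ih =>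
    rw [rlastc]
    cases h : rlastc c t with
    | some i =>
      have hc : c ∈ t := by
        by_contra hc
        rw [ih.mpr hc] at h; cases h
      simp [List.mem_cons, hc]
    | none =>
      by_cases hac : a = c
      · simp [hac]
      · simp [hac, ih.mp h]
        exact fun hh => hac hh.symm

theorem rlastc_spec {c : Char} {u : List Char} {m : Nat} (h : rlastc c u = some m) :
    m < u.length ∧ [c] <+: u.drop m ∧ ∀ i, m < i → ¬ [c] <+: u.drop i := by
  induction u generalizing m with
  | nil => cases h
  | cons a t ih =>
    rw [rlastc] at h
    cases ht : rlastc c t with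
    | some i =>
      rw [ht] at h
      cases h
      obtain ⟨h1, h2, h3⟩ := ih ht
      refine ⟨by simpa using h1, by simpa using h2, ?_⟩
      intro j hj
      cases j with
      | zero => omega
      | succ k => simpa using h3 k (by omega)
    | none =>
      rw [ht] at h
      by_cases hac : a = c
      · rw [if_pos hac] at h
        cases h
        refine ⟨by simp, by simp [List.cons_prefix_cons, hac], ?_⟩
        intro j hj
        cases j with
        | zero => omega
        | succ k =>
          simp only [List.drop_succ_cons]
          intro hp
          have : c ∈ t := by
            cases hk : t.drop k with
            | nil => rw [hk] at hp; exact absurd (List.prefix_nil.mp hp) (by simp)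
            | cons b tt =>
              rw [hk] at hp
              have hb : c = b := (List.cons_prefix_cons.mp hp).1
              exact hb ▸ (List.mem_of_mem_drop (hk ▸ List.mem_cons_self))
          exact (rlastc_none_iff.mp ht) this
      · rw [if_neg hac] at h; cases h

theorem rlastc_append_cons (c : Char) (l r : List Char) :
    rlastc c (l ++ c :: r) =
      some (match rlastc c r with | none => l.length | some i => l.length + 1 + i) := by
  induction l with
  | nil =>
    simp only [List.nil_append]
    rw [rlastc]
    cases h : rlastc c r
    · simp [h]
    · simp [h]
      ring
  | cons a t ih =>
    rw [List.cons_append, rlastc, ih]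
    cases h : rlastc c r
    · simp [h]
    · simp [h]
      ring

theorem rfind_go_neg (u : List Char) (c : Char) (j : Nat)
    (h : ∀ i, i ≤ j → ¬ [c] <+: u.drop i) : PySem.Chars.rfind.go u [c] j = -1 := by
  induction j with
  | zero =>
    rw [PySem.Chars.rfind.go]
    rw [if_neg (by simpa [List.isPrefixOf_iff_prefix] using h 0 (Nat.le_refl 0))]
  | succ k ih =>
    rw [PySem.Chars.rfind.go]
    rw [if_neg (by simpa [List.isPrefixOf_iff_prefix] using h (k + 1) (Nat.le_refl _))]
    exact ih (fun i hi => h i (by omega))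

theorem rfind_go_pos (u : List Char) (c : Char) (m j : Nat) (hm : m ≤ j)
    (hp : [c] <+: u.drop m) (hmax : ∀ i, m < i → i ≤ j → ¬ [c] <+: u.drop i) :
    PySem.Chars.rfind.go u [c] j = (m : Int) := by
  induction j with
  | zero =>
    have : m = 0 := by omega
    subst this
    rw [PySem.Chars.rfind.go]
    rw [if_pos (by simpa [List.isPrefixOf_iff_prefix] using hp)]
    simp
  | succ k ih =>
    rw [PySem.Chars.rfind.go]
    by_cases he : m = k + 1
    · subst he
      rw [if_pos (by simpa [List.isPrefixOf_iff_prefix] using hp)]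
    · rw [if_neg (by simpa [List.isPrefixOf_iff_prefix] using hmax (k + 1) (by omega) (Nat.le_refl _))]
      exact ih (by omega) (fun i hi1 hi2 => hmax i hi1 (by omega))

theorem rfind_eq_rlastc (u : List Char) (c : Char) :
    PySem.Chars.rfind u [c] =
      (match rlastc c u with | none => -1 | some i => ((i : Nat) : Int)) := by
  rw [PySem.Chars.rfind]
  cases h : rlastc c u with
  | none =>
    refine rfind_go_neg u c u.length (fun i hi hp => ?_)
    have hc : c ∈ u := by
      cases hk : u.drop i with
      | nil => rw [hk] at hp; exact absurd (List.prefix_nil.mp hp) (by simp)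
      | cons b tt =>
        rw [hk] at hp
        have hb : c = b := (List.cons_prefix_cons.mp hp).1
        exact hb ▸ List.mem_of_mem_drop (hk ▸ List.mem_cons_self)
    exact (rlastc_none_iff.mp h) hc
  | some m =>
    obtain ⟨h1, h2, h3⟩ := rlastc_spec h
    exact rfind_go_pos u c m u.length (by omega) h2 (fun i hi1 _ => h3 i hi1)

theorem splitOn_go_eq' :
    ∀ (fuel : Nat) (l cur : List Char) (acc : List (List Char)), l.length ≤ fuel →
      PySem.Chars.splitOn.go ['\n'] fuel l cur acc = acc.reverse ++ splitAux cur.reverse l := by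
  intro fuel
  induction fuel with
  | zero =>
    intro l cur acc hl
    have : l = [] := by cases l <;> simp_all
    subst this
    rw [PySem.Chars.splitOn.go, splitAux]
    simp
  | succ f ih =>
    intro l cur acc hl
    cases l with
    | nil =>
      rw [PySem.Chars.splitOn.go]
      · rw [splitAux]; simp
      · omega
    | cons a t =>
      rw [PySem.Chars.splitOn.go]
      by_cases ha : a = '\n'
      · subst ha
        rw [if_pos (by simp [List.isPrefixOf])]
        rw [show List.drop (['\n'] : List Char).length ('\n' :: t) = t from rfl]
        rw [ih t [] (cur.reverse :: acc) (by simpa using hl)]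
        rw [splitAux, if_pos rfl]
        simp
      · rw [if_neg (by simp [List.isPrefixOf]; exact fun hh => ha hh.symm)]
        rw [ih t (a :: cur) acc (by simpa using hl)]
        rw [splitAux, if_neg ha]
        simp

theorem splitOn_eq (s : List Char) : PySem.Chars.splitOn s ['\n'] = splitAux [] s := by
  rw [PySem.Chars.splitOn, splitOn_go_eq' (s.length + 1) s [] [] (by omega)]
  simp

theorem splitAux_no_nl (cur l : List Char) (h : '\n' ∉ l) : splitAux cur l = [cur ++ l] := by
  induction l generalizing cur with
  | nil => simp [splitAux]
  | cons a t ih =>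
    rw [splitAux, if_neg (fun hh => h (by simp [hh]))]
    rw [ih (cur ++ [a]) (fun hh => h (by simp [hh]))]
    simp

theorem splitAux_append (cur l r : List Char) (h : '\n' ∉ l) :
    splitAux cur (l ++ '\n' :: r) = (cur ++ l) :: splitAux [] r := by
  induction l generalizing cur with
  | nil => simp [splitAux]
  | cons a t ih =>
    rw [List.cons_append, splitAux, if_neg (fun hh => h (by simp [hh]))]
    rw [ih (cur ++ [a]) (fun hh => h (by simp [hh]))]
    simp

theorem exists_nl_split {s : List Char} (h : '\n' ∈ s) :
    ∃ l r, s = l ++ '\n' :: r ∧ '\n' ∉ l := by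
  induction s with
  | nil => cases h
  | cons a t ih =>
    by_cases ha : a = '\n'
    · exact ⟨[], t, by simp [ha], by simp⟩
    · have hmem : '\n' ∈ t := by
        rcases List.mem_cons.mp h with h1 | h2
        · exact absurd h1.symm ha
        · exact h2
      rcases ih hmem with ⟨l, r, rfl, hl⟩
      refine ⟨a :: l, r, by simp, ?_⟩
      simp [hl]
      exact fun hh => ha hh.symm


def sentinelC : List Char := "****************".toList

def lineOut (line : List Char) : List Char :=
  let name := PySem.Chars.strip
    (PySem.List.slice line (some (("Sender id:".toList).length : Int)) none)
  if name ≠ [] then name ++ [' '] else sentinelC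

theorem kwc_ne : "Sender id:".toList ≠ [] := by decide
theorem kwc_nl : '\n' ∉ "Sender id:".toList := by decide

theorem rfindFrom_take (s : List Char) (i : Nat) (hi : i ≤ s.length) :
    PySem.Chars.rfindFrom s ['\n'] 0 (some (i : Int)) =
      (match rlastc '\n' (s.take i) with | none => -1 | some m => ((m : Nat) : Int)) := by
  rw [PySem.Chars.rfindFrom]
  have h1 : ¬ ((s.length : Int) < (i : Int)) := by omega
  have h2 : ¬ ((i : Int) < 0) := by omega
  have h3 : ¬ ((0 : Int) < 0) := by omega
  simp only [if_neg h1, if_neg h2, if_neg h3]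
  simp only [Int.toNat_natCast, Int.toNat_zero, List.drop_zero]
  rw [rfind_eq_rlastc]
  cases h : rlastc '\n' (s.take i) with
  | none => simp [h]
  | some m =>
    simp only [h]
    rw [if_neg (show ¬ ((m : Int) = -1) by omega)]
    omega

theorem findFrom_drop (s : List Char) (i : Nat) (hi : i ≤ s.length) :
    PySem.Chars.findFrom s ['\n'] (i : Int) none =
      (match ffind ['\n'] (s.drop i) with | none => -1 | some m => ((i + m : Nat) : Int)) := by
  rw [PySem.Chars.findFrom_natCast s ['\n'] i hi]
  rw [find_eq ['\n'] (s.drop i) (by simp)]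
  cases h : ffind ['\n'] (s.drop i) <;> simp [h] <;> push_cast <;> ring

theorem B_found (l tail : List Char) (i : Nat) (hnl : '\n' ∉ l)
    (htail : tail = [] ∨ ∃ r, tail = '\n' :: r)
    (hf : ffind "Sender id:".toList (l ++ tail) = some i)
    (hi : i + "Sender id:".toList.length ≤ l.length) :
    getVismaAltCore (l ++ tail) = lineOut l := by
  have hK : "Sender id:".toList.length = 10 := by decide
  rw [hK] at hi
  simp only [getVismaAltCore]
  rw [find_eq _ _ kwc_ne, hf]
  rw [if_neg (show ¬ ((i : Nat) : Int) = -1 by omega)]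
  have hil : i ≤ (l ++ tail).length := by simp; omega
  rw [rfindFrom_take _ i hil]
  have hrl : rlastc '\n' ((l ++ tail).take i) = none := by
    rw [List.take_append_of_le_length (by omega), rlastc_none_iff]
    exact fun hm => hnl (List.mem_of_mem_take hm)
  rw [hrl]
  rw [findFrom_drop _ i hil]
  have hdrop : (l ++ tail).drop i = l.drop i ++ tail :=
    List.drop_append_of_le_length (by omega)
  have hnd : '\n' ∉ l.drop i := fun hm => hnl (List.mem_of_mem_drop hm)
  rcases htail with rfl | ⟨r, rfl⟩
  · have hff : ffind ['\n'] ((l ++ ([] : List Char)).drop i) = none := by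
      rw [hdrop, List.append_nil, ffind_singleton_none_iff]
      exact hnd
    rw [hff]
    simp only [List.append_nil]
    norm_num
    simp [lineOut, sentinelC, PySem.List.slice_from, show "Sender id:".length = 10 from by decide]
  · have hff : ffind ['\n'] ((l ++ '\n' :: r).drop i) = some (l.length - i) := by
      rw [hdrop]
      have := ffind_singleton_append (c := '\n') (u := l.drop i) (r := r) hnd
      simpa using this
    rw [hff]
    norm_num [show ((i + (l.length - i) : Nat) : Int) = (l.length : Int) from by omega,
      show ¬ ((l.length : Int) = -1) from by omega]
    simp [lineOut, sentinelC, PySem.List.slice_from, show "Sender id:".length = 10 from by decide]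

theorem B_none {s : List Char} (h : ffind "Sender id:".toList s = none) :
    getVismaAltCore s = sentinelC := by
  simp only [getVismaAltCore]
  rw [find_eq _ _ kwc_ne, h]
  simp [sentinelC]

theorem drop_shift (l r : List Char) (a : Nat) :
    (l ++ '\n' :: r).drop (l.length + 1 + a) = r.drop a := by
  have h1 : l.length + 1 + a - l.length = a + 1 := by omega
  simp [List.drop_append, h1]
  omega

theorem slice_shift (l r : List Char) (a b : Nat) :
    PySem.List.slice (l ++ '\n' :: r) (some ((l.length + 1 + a : Nat) : Int))
        (some ((l.length + 1 + b : Nat) : Int)) =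
      PySem.List.slice r (some ((a : Nat) : Int)) (some ((b : Nat) : Int)) := by
  rw [PySem.List.slice_natCast, PySem.List.slice_natCast, drop_shift]
  congr 1
  omega

theorem B_shift (l r : List Char) (j : Nat) (hnl : '\n' ∉ l)
    (hfl : ffind "Sender id:".toList l = none)
    (hfr : ffind "Sender id:".toList r = some j) :
    getVismaAltCore (l ++ '\n' :: r) = getVismaAltCore r := by
  have hjr : j + 10 ≤ r.length := by
    have hp := (ffind_some_prefix hfr).length_le
    simp at hp
    omega
  have hfs : ffind "Sender id:".toList (l ++ '\n' :: r) = some (l.length + 1 + j) := by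
    rw [ffind_split kwc_ne kwc_nl, hfl, hfr]
    simp
  simp only [getVismaAltCore]
  rw [find_eq _ _ kwc_ne, hfs, find_eq _ _ kwc_ne, hfr]
  rw [if_neg (show ¬ ((l.length + 1 + j : Nat) : Int) = -1 by omega)]
  rw [if_neg (show ¬ ((j : Nat) : Int) = -1 by omega)]
  have hilS : l.length + 1 + j ≤ (l ++ '\n' :: r).length := by simp; omega
  rw [rfindFrom_take _ _ hilS, rfindFrom_take r j (by omega)]
  have htakeS : (l ++ '\n' :: r).take (l.length + 1 + j) = l ++ '\n' :: r.take j := by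
    have h1 : l.length + 1 + j - l.length = j + 1 := by omega
    simp [List.take_append, h1, List.take_of_length_le]
    omega
  rw [htakeS, rlastc_append_cons]
  have hdropS : (l ++ '\n' :: r).drop (l.length + 1 + j) = r.drop j := drop_shift l r j
  rw [findFrom_drop _ _ hilS, findFrom_drop r j (by omega), hdropS]
  cases hc : rlastc '\n' (List.take j r) with
  | none =>
    cases he : ffind ['\n'] (List.drop j r) with
    | none =>
      norm_num
      rw [show PySem.List.slice (l ++ '\n' :: r) (some ((l.length : Int) + 1))
            (some ((l.length : Int) + ((r.length : Int) + 1))) = r from by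
          rw [show ((l.length : Int) + 1) = ((l.length + 1 + 0 : Nat) : Int) from by push_cast; ring,
            show ((l.length : Int) + ((r.length : Int) + 1)) = ((l.length + 1 + r.length : Nat) : Int) from by push_cast; ring,
            slice_shift, PySem.List.slice_natCast]
          simp]
    | some m2 =>
      norm_num
      rw [if_neg (show ¬ ((l.length : Int) + 1 + (j : Int) + (m2 : Int) = -1) by omega)]
      rw [if_neg (show ¬ ((j : Int) + (m2 : Int) = -1) by omega)]
      rw [show PySem.List.slice (l ++ '\n' :: r) (some ((l.length : Int) + 1))
            (some ((l.length : Int) + 1 + (j : Int) + (m2 : Int))) =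
            PySem.List.slice r none (some ((j : Int) + (m2 : Int))) from by
          rw [show ((l.length : Int) + 1 + (j : Int) + (m2 : Int)) = ((l.length + 1 + (j + m2) : Nat) : Int) from by push_cast; ring,
            show ((l.length : Int) + 1) = ((l.length + 1 + 0 : Nat) : Int) from by push_cast; ring,
            slice_shift]
          push_cast
          simp]
  | some m =>
    cases he : ffind ['\n'] (List.drop j r) with
    | none =>
      norm_num
      rw [show PySem.List.slice (l ++ '\n' :: r) (some ((l.length : Int) + 1 + (m : Int) + 1))
            (some ((l.length : Int) + ((r.length : Int) + 1))) =
            PySem.List.slice r (some ((m : Int) + 1)) (some ((r.length : Int))) from by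
          rw [show ((l.length : Int) + 1 + (m : Int) + 1) = ((l.length + 1 + (m + 1) : Nat) : Int) from by push_cast; ring,
            show ((l.length : Int) + ((r.length : Int) + 1)) = ((l.length + 1 + r.length : Nat) : Int) from by push_cast; ring,
            slice_shift]
          push_cast
          simp]
    | some m2 =>
      norm_num
      rw [if_neg (show ¬ ((l.length : Int) + 1 + (j : Int) + (m2 : Int) = -1) by omega)]
      rw [if_neg (show ¬ ((j : Int) + (m2 : Int) = -1) by omega)]
      rw [show PySem.List.slice (l ++ '\n' :: r) (some ((l.length : Int) + 1 + (m : Int) + 1))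
            (some ((l.length : Int) + 1 + (j : Int) + (m2 : Int))) =
            PySem.List.slice r (some ((m : Int) + 1)) (some ((j : Int) + (m2 : Int))) from by
          rw [show ((l.length : Int) + 1 + (j : Int) + (m2 : Int)) = ((l.length + 1 + (j + m2) : Nat) : Int) from by push_cast; ring,
            show ((l.length : Int) + 1 + (m : Int) + 1) = ((l.length + 1 + (m + 1) : Nat) : Int) from by push_cast; ring,
            slice_shift]
          push_cast
          simp]

theorem isIn_some (e : List Char) :
    PySem.Chars.isIn "Sender id:".toList e = (ffind "Sender id:".toList e).isSome := by
  rw [PySem.Chars.isIn, find_eq _ _ kwc_ne]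
  cases h : ffind "Sender id:".toList e with
  | none => simp
  | some i => simp [bne_iff_ne]; try omega

theorem coreA_shape (s : List Char) :
    getVismaCore s =
      (match (splitAux [] s).filter (fun e => PySem.Chars.isIn "Sender id:".toList e) with
       | [] => sentinelC
       | l0 :: _ => lineOut l0) := by
  simp only [getVismaCore]
  rw [splitOn_eq, PySem.List.foldl_append_if_eq_filter]
  simp only [List.nil_append]
  cases hf : (splitAux [] s).filter (fun e => PySem.Chars.isIn "Sender id:".toList e) with
  | nil => simp [sentinelC]
  | cons l0 ls => simp [lineOut, sentinelC]

theorem core_eq_n : ∀ (n : Nat) (s : List Char), s.length ≤ n →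
    getVismaCore s = getVismaAltCore s := by
  intro n
  induction n with
  | zero =>
    intro s hs
    have : s = [] := by cases s <;> simp_all
    subst this
    decide
  | succ n ih =>
    intro s hs
    by_cases hnl : '\n' ∈ s
    · obtain ⟨l, r, rfl, hl⟩ := exists_nl_split hnl
      cases hfl : ffind "Sender id:".toList l with
      | some i =>
        rw [coreA_shape, splitAux_append [] l r hl]
        simp only [List.nil_append, List.filter_cons]
        rw [isIn_some, hfl]
        have hi10 : i + "Sender id:".toList.length ≤ l.length := by
          have hp := (ffind_some_prefix hfl).length_le
          simp at hp
          have : "Sender id:".toList.length = 10 := by decide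
          omega
        rw [B_found l ('\n' :: r) i hl (Or.inr ⟨r, rfl⟩)
          (by rw [ffind_split kwc_ne kwc_nl, hfl]) hi10]
        simp
      | none =>
        have hlr : r.length ≤ n := by
          simp only [List.length_append, List.length_cons] at hs
          omega
        have hA : getVismaCore (l ++ '\n' :: r) = getVismaCore r := by
          rw [coreA_shape, coreA_shape, splitAux_append [] l r hl]
          simp only [List.nil_append, List.filter_cons]
          rw [isIn_some, hfl]
          simp
        rw [hA]
        cases hfr : ffind "Sender id:".toList r with
        | none =>
          rw [ih r hlr, B_none hfr, B_none (by rw [ffind_split kwc_ne kwc_nl, hfl, hfr]; rfl)]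
        | some j =>
          rw [B_shift l r j hl hfl hfr, ih r hlr]
    · cases hf : ffind "Sender id:".toList s with
      | none =>
        rw [coreA_shape, splitAux_no_nl [] s hnl]
        simp only [List.nil_append, List.filter_cons, List.filter_nil]
        rw [isIn_some, hf]
        rw [B_none hf]
        simp
      | some i =>
        rw [coreA_shape, splitAux_no_nl [] s hnl]
        simp only [List.nil_append, List.filter_cons, List.filter_nil]
        rw [isIn_some, hf]
        have hi10 : i + "Sender id:".toList.length ≤ s.length := by
          have hp := (ffind_some_prefix hf).length_le
          simp at hp
          have : "Sender id:".toList.length = 10 := by decide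
          omega
        have hb := B_found s [] i hnl (Or.inl rfl) (by simpa using hf) hi10
        rw [List.append_nil] at hb
        rw [hb]
        simp

theorem core_eq' (s : List Char) : getVismaCore s = getVismaAltCore s :=
  core_eq_n s.length s le_rfl

-- ===== VERDICT (by name: the statement is the Claim_ definition above) =====
theorem getVisma_spec : Claim_equal_getVisma := by
  intro text _
  unfold Spec_getVisma getVisma getVisma_alt
  rw [core_eq']
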